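-- pv_equiv track=rewrite | github.com/robhansen/advent2024 | day12.py | get_adjacent_fences
-- ===== SOURCE A (Python) =====
-- def get_adjacent_fences(side, fences, fence):
--     next_fences = []
--     next_fences.append(((fence[0][0]+fence[1][0], fence[0][1]+fence[1][1]), fence[1]))
--     next_fences.append(((fence[0][0]-fence[1][0], fence[0][1]-fence[1][1]), fence[1])) # adjacent fences in a side can be in two different directions
--     for next_fence in next_fences:
--         if next_fence not in side and next_fence in fences:
--                 side.add(next_fence)
--                 side = get_adjacent_fences(side, fences, next_fence)
--     return side
-- ===== SOURCE B (Python) =====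
-- def get_adjacent_fences(side, fences, fence):
--     stack = [((fence[0][0]-fence[1][0], fence[0][1]-fence[1][1]), fence[1]),
--              ((fence[0][0]+fence[1][0], fence[0][1]+fence[1][1]), fence[1])]
--     while stack:
--         f = stack.pop()
--         if f not in side and f in fences:
--             side.add(f)
--             stack.append(((f[0][0]-f[1][0], f[0][1]-f[1][1]), f[1]))
--             stack.append(((f[0][0]+f[1][0], f[0][1]+f[1][1]), f[1]))
--     return side
-- ===== Notes on version B (the rewrite author's own statement) =====
-- stated objective: alternative
-- what changed: Replaces A's self-recursive DFS over the two neighbouring fences with an iterative worklist loop: an explicit stack of candidate fences seeded with the two neighbours, popped and expanded in place, so no recursion is needed.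
import Mathlib
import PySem

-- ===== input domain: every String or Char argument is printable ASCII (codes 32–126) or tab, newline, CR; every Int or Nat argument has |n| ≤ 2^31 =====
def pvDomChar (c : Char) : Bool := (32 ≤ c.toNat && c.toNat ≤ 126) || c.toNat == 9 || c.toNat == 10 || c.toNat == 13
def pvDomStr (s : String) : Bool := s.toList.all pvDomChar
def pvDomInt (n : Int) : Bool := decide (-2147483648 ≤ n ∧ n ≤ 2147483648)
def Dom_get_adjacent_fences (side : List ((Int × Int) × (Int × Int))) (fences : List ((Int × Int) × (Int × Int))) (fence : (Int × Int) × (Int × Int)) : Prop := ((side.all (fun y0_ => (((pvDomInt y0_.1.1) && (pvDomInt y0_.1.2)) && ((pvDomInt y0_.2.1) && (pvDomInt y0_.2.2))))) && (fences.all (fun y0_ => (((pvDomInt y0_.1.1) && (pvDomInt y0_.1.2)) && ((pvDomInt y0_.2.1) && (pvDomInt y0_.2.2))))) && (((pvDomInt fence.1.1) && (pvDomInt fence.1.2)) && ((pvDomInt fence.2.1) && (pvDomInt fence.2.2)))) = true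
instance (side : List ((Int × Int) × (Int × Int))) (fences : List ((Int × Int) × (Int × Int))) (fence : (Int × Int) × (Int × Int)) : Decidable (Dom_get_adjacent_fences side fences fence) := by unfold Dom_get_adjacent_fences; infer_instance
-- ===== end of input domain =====

-- B replaces A's recursion by an explicit stack-based loop (same fence arithmetic, same
-- depth-first discovery order), avoiding Python recursion; equivalence is about the RETURN
-- value (both A and B also mutate the argument set `side` in place in Python).

-- number of fences not yet in side: the termination measure of both ports
def pvUnseen (fences side : List ((Int × Int) × (Int × Int))) : Nat :=
  (fences.filter (fun y => !(side.contains y))).length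

theorem pvFilterMono {α : Type} (p q : α → Bool) (l : List α)
    (h : ∀ y, q y = true → p y = true) :
    (l.filter q).length ≤ (l.filter p).length := by
  induction l with
  | nil => simp
  | cons a t ih =>
    simp only [List.filter_cons]
    by_cases ha : q a = true
    · rw [if_pos ha, if_pos (h a ha)]; simp only [List.length_cons]; omega
    · rw [if_neg ha]
      split
      · simp only [List.length_cons]; omega
      · omega

theorem pvFilterLt {α : Type} (p q : α → Bool) (l : List α)
    (h : ∀ y, q y = true → p y = true)
    (x : α) (hx : x ∈ l) (hp : p x = true) (hq : q x = false) :
    (l.filter q).length < (l.filter p).length := by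
  induction l with
  | nil => simp at hx
  | cons a t ih =>
    simp only [List.filter_cons]
    rcases List.mem_cons.mp hx with h1 | h1
    · subst h1
      rw [if_pos hp, if_neg (by simp [hq])]
      have := pvFilterMono p q t h
      simp only [List.length_cons]; omega
    · by_cases ha : q a = true
      · rw [if_pos ha, if_pos (h a ha)]
        simpa using ih h1
      · rw [if_neg ha]
        have := ih h1
        split
        · simp only [List.length_cons]; omega
        · omega

theorem pvUnseen_lt (fences side : List ((Int × Int) × (Int × Int)))
    (x : (Int × Int) × (Int × Int)) (h1 : x ∉ side) (h2 : x ∈ fences) :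
    pvUnseen fences (PySem.Set.add side x) < pvUnseen fences side := by
  have hadd : PySem.Set.add side x = side ++ [x] := by
    simp [PySem.Set.add, PySem.Set.contains, h1]
  rw [hadd]
  unfold pvUnseen
  refine pvFilterLt _ _ _ (fun y hy => ?_) x h2 (by simp [h1]) (by simp)
  simp only [List.contains_append, Bool.not_or, Bool.and_eq_true] at hy
  exact hy.1

theorem pvUnseen_mono (fences : List ((Int × Int) × (Int × Int)))
    {s t : List ((Int × Int) × (Int × Int))} (h : ∀ y, y ∈ s → y ∈ t) :
    pvUnseen fences t ≤ pvUnseen fences s := by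
  unfold pvUnseen
  apply pvFilterMono
  intro y hy
  simp only [Bool.not_eq_true'] at hy ⊢
  by_contra hc
  have : y ∈ s := by simpa using Bool.of_not_eq_false hc
  have : y ∈ t := h y this
  simp [this] at hy

theorem pvMemAdd {s : List ((Int × Int) × (Int × Int))} {x y : (Int × Int) × (Int × Int)}
    (h : y ∈ s) : y ∈ PySem.Set.add s x := by
  simp [PySem.Set.add]; split <;> simp [h]

-- ===== PORT A =====
-- A's recursion, with the invariant "the input side is contained in the result" carried in a
-- subtype (needed only for the termination measure pvUnseen).
def gafAux (fences side : List ((Int × Int) × (Int × Int))) (fence : (Int × Int) × (Int × Int)) :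
    {r : List ((Int × Int) × (Int × Int)) // ∀ y, y ∈ side → y ∈ r} :=
  let nf1 : (Int × Int) × (Int × Int) := ((fence.1.1 + fence.2.1, fence.1.2 + fence.2.2), fence.2)
  let nf2 : (Int × Int) × (Int × Int) := ((fence.1.1 - fence.2.1, fence.1.2 - fence.2.2), fence.2)
  if h1 : nf1 ∉ side ∧ nf1 ∈ fences then
    let r1 := gafAux fences (PySem.Set.add side nf1) nf1
    if h2 : nf2 ∉ r1.val ∧ nf2 ∈ fences then
      let r2 := gafAux fences (PySem.Set.add r1.val nf2) nf2
      ⟨r2.val, fun y hy => r2.property _ (pvMemAdd (r1.property _ (pvMemAdd hy)))⟩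
    else ⟨r1.val, fun y hy => r1.property _ (pvMemAdd hy)⟩
  else
    if h2 : nf2 ∉ side ∧ nf2 ∈ fences then
      let r2 := gafAux fences (PySem.Set.add side nf2) nf2
      ⟨r2.val, fun y hy => r2.property _ (pvMemAdd hy)⟩
    else ⟨side, fun _ h => h⟩
termination_by pvUnseen fences side
decreasing_by
  · exact pvUnseen_lt fences side _ h1.1 h1.2
  · exact Nat.lt_trans (pvUnseen_lt fences _ _ h2.1 h2.2)
      (Nat.lt_of_le_of_lt
        (pvUnseen_mono fences r1.property)
        (pvUnseen_lt fences side _ h1.1 h1.2))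
  · exact pvUnseen_lt fences side _ h2.1 h2.2

def get_adjacent_fences (side : List ((Int × Int) × (Int × Int))) (fences : List ((Int × Int) × (Int × Int))) (fence : (Int × Int) × (Int × Int)) : List ((Int × Int) × (Int × Int)) :=
  (gafAux fences side fence).val

-- ===== PORT B =====
-- Source B's while-loop: stack is a Python list, pop() takes the LAST element, append pushes at the end
def gafLoop (fences side : List ((Int × Int) × (Int × Int)))
    (stack : List ((Int × Int) × (Int × Int))) : List ((Int × Int) × (Int × Int)) :=
  if hne : stack = [] then side
  else
    let f := stack.getLast hne
    let rest := stack.dropLast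
    if h : f ∉ side ∧ f ∈ fences then
      gafLoop fences (PySem.Set.add side f)
        (rest ++ [((f.1.1 - f.2.1, f.1.2 - f.2.2), f.2), ((f.1.1 + f.2.1, f.1.2 + f.2.2), f.2)])
    else gafLoop fences side rest
termination_by 2 * pvUnseen fences side + stack.length
decreasing_by
  · have h1 : pvUnseen fences (PySem.Set.add side (stack.getLast hne)) < pvUnseen fences side :=
      pvUnseen_lt fences side _ h.1 h.2
    have h3 : 1 ≤ stack.length := List.length_pos_iff.mpr hne
    simp only [List.length_append, List.length_dropLast, List.length_cons, List.length_nil]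
    omega
  · have h3 : 1 ≤ stack.length := List.length_pos_iff.mpr hne
    simp only [List.length_dropLast]
    omega

def get_adjacent_fences_alt (side : List ((Int × Int) × (Int × Int))) (fences : List ((Int × Int) × (Int × Int))) (fence : (Int × Int) × (Int × Int)) : List ((Int × Int) × (Int × Int)) :=
  gafLoop fences side
    [((fence.1.1 - fence.2.1, fence.1.2 - fence.2.2), fence.2),
     ((fence.1.1 + fence.2.1, fence.1.2 + fence.2.2), fence.2)]

-- ===== PRECONDITION & SPEC =====
def Spec_get_adjacent_fences (side : List ((Int × Int) × (Int × Int))) (fences : List ((Int × Int) × (Int × Int))) (fence : (Int × Int) × (Int × Int)) (out : List ((Int × Int) × (Int × Int))) : Prop := out = get_adjacent_fences_alt side fences fence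
instance (side : List ((Int × Int) × (Int × Int))) (fences : List ((Int × Int) × (Int × Int))) (fence : (Int × Int) × (Int × Int)) (out : List ((Int × Int) × (Int × Int))) : Decidable (Spec_get_adjacent_fences side fences fence out) := by unfold Spec_get_adjacent_fences; infer_instance

-- ===== CLAIM (what is proved, stated in full; the proofs are below) =====
def Claim_equal_get_adjacent_fences : Prop := ∀ (side : List ((Int × Int) × (Int × Int))) (fences : List ((Int × Int) × (Int × Int))) (fence : (Int × Int) × (Int × Int)), Dom_get_adjacent_fences side fences fence → Spec_get_adjacent_fences side fences fence (get_adjacent_fences side fences fence)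

-- ===== LEMMAS AND PROOFS =====

-- the effect of A's loop body on one candidate fence
def pvVisit (fences side : List ((Int × Int) × (Int × Int))) (x : (Int × Int) × (Int × Int)) :
    List ((Int × Int) × (Int × Int)) :=
  if x ∉ side ∧ x ∈ fences then (gafAux fences (PySem.Set.add side x) x).val else side

theorem gafAux_val (fences side : List ((Int × Int) × (Int × Int))) (fence : (Int × Int) × (Int × Int)) :
    (gafAux fences side fence).val =
      pvVisit fences (pvVisit fences side ((fence.1.1 + fence.2.1, fence.1.2 + fence.2.2), fence.2))
        ((fence.1.1 - fence.2.1, fence.1.2 - fence.2.2), fence.2) := by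
  rw [gafAux]
  simp only [pvVisit]
  by_cases hp : ((fence.1.1 + fence.2.1, fence.1.2 + fence.2.2), fence.2) ∉ side ∧ ((fence.1.1 + fence.2.1, fence.1.2 + fence.2.2), fence.2) ∈ fences
  · rw [if_pos hp]
    by_cases hm : ((fence.1.1 - fence.2.1, fence.1.2 - fence.2.2), fence.2) ∉ (gafAux fences (PySem.Set.add side ((fence.1.1 + fence.2.1, fence.1.2 + fence.2.2), fence.2)) ((fence.1.1 + fence.2.1, fence.1.2 + fence.2.2), fence.2)).val ∧ ((fence.1.1 - fence.2.1, fence.1.2 - fence.2.2), fence.2) ∈ fences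
    · rw [if_pos hm]; simp [hp, hm]
    · rw [if_neg hm]; simp [hp, hm]
  · rw [if_neg hp]
    by_cases hm : ((fence.1.1 - fence.2.1, fence.1.2 - fence.2.2), fence.2) ∉ side ∧ ((fence.1.1 - fence.2.1, fence.1.2 - fence.2.2), fence.2) ∈ fences
    · rw [if_pos hm]; simp [hp, hm]
    · rw [if_neg hm]; simp [hp, hm]

theorem pvVisit_mem (fences side : List ((Int × Int) × (Int × Int)))
    (x y : (Int × Int) × (Int × Int)) (h : y ∈ side) : y ∈ pvVisit fences side x := by
  unfold pvVisit
  split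
  · exact (gafAux fences _ x).property y (pvMemAdd h)
  · exact h

theorem gafLoop_nil (fences side : List ((Int × Int) × (Int × Int))) :
    gafLoop fences side [] = side := by rw [gafLoop.eq_def]; simp

theorem gafLoop_concat (fences : List ((Int × Int) × (Int × Int))) :
    ∀ (n : Nat) (side : List ((Int × Int) × (Int × Int))), pvUnseen fences side ≤ n →
    ∀ (stack : List ((Int × Int) × (Int × Int))) (x : (Int × Int) × (Int × Int)),
      gafLoop fences side (stack ++ [x]) = gafLoop fences (pvVisit fences side x) stack := by
  intro n
  induction n with
  | zero =>
    intro side hn stack x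
    rw [gafLoop.eq_def]
    split
    · simp_all
    simp only [List.getLast_concat, List.dropLast_concat]
    have hx : ¬ (x ∉ side ∧ x ∈ fences) := by
      rintro ⟨hx1, hx2⟩
      have := pvUnseen_lt fences side x hx1 hx2
      omega
    rw [dif_neg hx]
    unfold pvVisit
    rw [if_neg hx]
  | succ m ih =>
    intro side hn stack x
    rw [gafLoop.eq_def]
    split
    · simp_all
    simp only [List.getLast_concat, List.dropLast_concat]
    by_cases hx : x ∉ side ∧ x ∈ fences
    · rw [dif_pos hx]
      have h1 : pvUnseen fences (PySem.Set.add side x) ≤ m := by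
        have := pvUnseen_lt fences side x hx.1 hx.2; omega
      have heq : stack ++ [((x.1.1 - x.2.1, x.1.2 - x.2.2), x.2), ((x.1.1 + x.2.1, x.1.2 + x.2.2), x.2)]
          = (stack ++ [((x.1.1 - x.2.1, x.1.2 - x.2.2), x.2)]) ++ [((x.1.1 + x.2.1, x.1.2 + x.2.2), x.2)] := by
        simp
      rw [heq, ih _ h1]
      have h2 : pvUnseen fences (pvVisit fences (PySem.Set.add side x) ((x.1.1 + x.2.1, x.1.2 + x.2.2), x.2)) ≤ m := by
        have := pvUnseen_mono fences (fun y hy => pvVisit_mem fences (PySem.Set.add side x) ((x.1.1 + x.2.1, x.1.2 + x.2.2), x.2) y hy)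
        omega
      rw [ih _ h2]
      have hv : pvVisit fences side x = (gafAux fences (PySem.Set.add side x) x).val := by
        unfold pvVisit; rw [if_pos hx]
      rw [hv, gafAux_val]
    · rw [dif_neg hx]
      have hv : pvVisit fences side x = side := by unfold pvVisit; rw [if_neg hx]
      rw [hv]

-- ===== VERDICT (by name: the statement is the Claim_ definition above) =====
theorem get_adjacent_fences_spec : Claim_equal_get_adjacent_fences := by
  intro side fences fence _
  unfold Spec_get_adjacent_fences get_adjacent_fences get_adjacent_fences_alt
  have h1 : [((fence.1.1 - fence.2.1, fence.1.2 - fence.2.2), fence.2),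
      ((fence.1.1 + fence.2.1, fence.1.2 + fence.2.2), fence.2)]
      = ([((fence.1.1 - fence.2.1, fence.1.2 - fence.2.2), fence.2)] ++ [((fence.1.1 + fence.2.1, fence.1.2 + fence.2.2), fence.2)]) := by simp
  rw [h1, gafLoop_concat fences (pvUnseen fences side) side le_rfl]
  have h2 : pvUnseen fences (pvVisit fences side ((fence.1.1 + fence.2.1, fence.1.2 + fence.2.2), fence.2)) ≤ pvUnseen fences side :=
    pvUnseen_mono fences (fun y hy => pvVisit_mem _ _ _ y hy)
  have h3 : [((fence.1.1 - fence.2.1, fence.1.2 - fence.2.2), fence.2)]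
      = ([] ++ [((fence.1.1 - fence.2.1, fence.1.2 - fence.2.2), fence.2)]) := by simp
  rw [h3, gafLoop_concat fences (pvUnseen fences side) _ h2, gafLoop_nil, gafAux_val]
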